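-- pv_equiv track=rewrite | github.com/bearsharktopus-dev/chum-wiki | spoilerize.py | indent_block
-- ===== SOURCE A (Python) =====
-- def indent_block(text):
--     """Indent content for use inside an admonition block.
--
--     Non-empty lines get 4-space indent. Blank lines stay blank but
--     consecutive blank lines are collapsed to one (to avoid breaking
--     the admonition block).
--     """
--     lines = text.strip().split("\n")
--     result = []
--     prev_blank = False
--     for line in lines:
--         if line.strip():
--             result.append("    " + line)
--             prev_blank = False
--         else:
--             if not prev_blank:
--                 result.append("")
--             prev_blank = True
--     # Remove trailing blank lines
--     while result and not result[-1].strip():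
--         result.pop()
--     return "\n".join(result)
-- ===== SOURCE B (Python) =====
-- def indent_block(text):
--     """Indent content for use inside an admonition block.
--
--     Stateless re-formulation: pair every line with its predecessor and
--     keep a line unless it is a blank that follows another blank.
--     """
--     lines = text.strip().split("\n")
--     prevs = [None] + lines
--     kept = [
--         "    " + line if line.strip() else ""
--         for prev, line in zip(prevs, lines)
--         if line.strip() or prev is None or prev.strip()
--     ]
--     while kept and not kept[-1].strip():
--         kept.pop()
--     return "\n".join(kept)
-- ===== Notes on version B (the rewrite author's own statement) =====
-- stated objective: alternative
-- what changed: Replaces A's stateful prev_blank-flag loop by a stateless zip-with-predecessor comprehension: a line is kept unless it is a blank following another blank.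
import Mathlib
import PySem

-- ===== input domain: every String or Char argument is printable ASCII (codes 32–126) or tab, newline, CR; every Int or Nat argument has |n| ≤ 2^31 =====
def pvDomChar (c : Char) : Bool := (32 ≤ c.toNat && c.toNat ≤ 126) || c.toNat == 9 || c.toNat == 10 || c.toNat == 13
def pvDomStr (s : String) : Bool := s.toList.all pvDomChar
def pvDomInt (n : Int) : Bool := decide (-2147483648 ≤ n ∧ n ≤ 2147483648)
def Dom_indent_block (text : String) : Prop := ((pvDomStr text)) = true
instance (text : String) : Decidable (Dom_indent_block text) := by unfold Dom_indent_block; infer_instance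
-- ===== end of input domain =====

-- B replaces A's prev_blank-flag loop by a stateless zip-with-predecessor filter; return values proved equal on all inputs.

-- ===== PORT A =====
-- 'line.strip()' is truthy iff the stripped line is nonempty
def pvBlankA (l : List Char) : Bool := (PySem.Chars.strip l).isEmpty

-- the for-loop over lines with state (result, prev_blank)
def pvLoopA (res : List (List Char)) (prevBlank : Bool) : List (List Char) → List (List Char)
  | [] => res
  | l :: ls =>
    if !pvBlankA l then pvLoopA (res ++ ["    ".toList ++ l]) false ls
    else if !prevBlank then pvLoopA (res ++ [[]]) true ls
    else pvLoopA res true ls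

-- 'while result and not result[-1].strip(): result.pop()'
def pvPopA (res : List (List Char)) : List (List Char) :=
  (res.reverse.dropWhile pvBlankA).reverse

def indent_block (text : String) : String :=
  let lines := PySem.Chars.splitOn (PySem.Chars.strip text.toList) ['\n']
  String.ofList (PySem.Chars.join ['\n'] (pvPopA (pvLoopA [] false lines)))

-- ===== PORT B =====
def pvBlankB (l : List Char) : Bool := (PySem.Chars.strip l).isEmpty

-- the comprehension's filter: 'line.strip() or prev is None or prev.strip()'
def pvKeepB (p : Option (List Char)) (l : List Char) : Bool :=
  !pvBlankB l || (match p with | none => true | some q => !pvBlankB q)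

-- the comprehension's value: '"    " + line if line.strip() else ""'
def pvEmitB (l : List Char) : List Char :=
  if !pvBlankB l then "    ".toList ++ l else []

def pvPopB (res : List (List Char)) : List (List Char) :=
  (res.reverse.dropWhile pvBlankB).reverse

def indent_block_alt (text : String) : String :=
  let lines := PySem.Chars.splitOn (PySem.Chars.strip text.toList) ['\n']
  let prevs : List (Option (List Char)) := none :: lines.map some
  let kept := ((prevs.zip lines).filter (fun pl => pvKeepB pl.1 pl.2)).map (fun pl => pvEmitB pl.2)
  String.ofList (PySem.Chars.join ['\n'] (pvPopB kept))

-- ===== PRECONDITION & SPEC =====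
def Spec_indent_block (text : String) (out : String) : Prop := out = indent_block_alt text
instance (text : String) (out : String) : Decidable (Spec_indent_block text out) := by unfold Spec_indent_block; infer_instance

-- ===== CLAIM (what is proved, stated in full; the proofs are below) =====
def Claim_equal_indent_block : Prop := ∀ (text : String), Dom_indent_block text → Spec_indent_block text (indent_block text)

-- ===== LEMMAS AND PROOFS =====

-- blankness of the 'previous' element that A's flag encodes
def pvPrevBlank (p : Option (List Char)) : Bool :=
  match p with | none => false | some q => pvBlankB q

theorem pvKeepB_eq (p : Option (List Char)) (l : List Char) :
    pvKeepB p l = (!pvBlankB l || !pvPrevBlank p) := by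
  cases p <;> simp [pvKeepB, pvPrevBlank]

theorem pvLoopA_eq_zipFilter (ls : List (List Char)) :
    ∀ (res : List (List Char)) (p : Option (List Char)),
      pvLoopA res (pvPrevBlank p) ls =
        res ++ (((p :: ls.map some).zip ls).filter (fun pl => pvKeepB pl.1 pl.2)).map
          (fun pl => pvEmitB pl.2) := by
  induction ls with
  | nil => intro res p; simp [pvLoopA]
  | cons l ls ih =>
    intro res p
    have hz : (p :: (l :: ls).map some).zip (l :: ls)
        = (p, l) :: ((some l :: ls.map some).zip ls) := by simp
    by_cases hb : pvBlankA l
    · have hbB : pvBlankB l = true := hb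
      by_cases hp : pvPrevBlank p
      · -- blank line after blank: A skips, B filters it out
        have hk : pvKeepB p l = false := by simp [pvKeepB_eq, hbB, hp]
        have hA : pvLoopA res (pvPrevBlank p) (l :: ls)
            = pvLoopA res (pvPrevBlank (some l)) ls := by
          rw [hp]; simp [pvLoopA, hb, pvPrevBlank, hbB]
        rw [hA, ih res (some l), hz]
        simp [hk]
      · -- first blank of a run: both emit ""
        have hk : pvKeepB p l = true := by simp [pvKeepB_eq, hp]
        have hA : pvLoopA res (pvPrevBlank p) (l :: ls)
            = pvLoopA (res ++ [[]]) (pvPrevBlank (some l)) ls := by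
          simp only [Bool.not_eq_true] at hp
          rw [hp]; simp [pvLoopA, hb, pvPrevBlank, hbB]
        rw [hA, ih (res ++ [[]]) (some l), hz]
        simp [hk, pvEmitB, hbB]
    · -- non-blank line: both emit the indented line
      simp only [Bool.not_eq_true] at hb
      have hbB : pvBlankB l = false := hb
      have hk : pvKeepB p l = true := by simp [pvKeepB_eq, hbB]
      have hA : pvLoopA res (pvPrevBlank p) (l :: ls)
          = pvLoopA (res ++ ["    ".toList ++ l]) (pvPrevBlank (some l)) ls := by
        simp [pvLoopA, hb, pvPrevBlank, hbB]

      rw [hA, ih (res ++ ["    ".toList ++ l]) (some l), hz]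
      simp [hk, pvEmitB, hbB]

-- ===== VERDICT (by name: the statement is the Claim_ definition above) =====
theorem indent_block_spec : Claim_equal_indent_block := by
  intro text _
  simp only [Spec_indent_block, indent_block, indent_block_alt, pvPopA, pvPopB]
  have h := pvLoopA_eq_zipFilter
    (PySem.Chars.splitOn (PySem.Chars.strip text.toList) ['\n']) [] none
  simp [pvPrevBlank] at h
  rw [h]
  rfl
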